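-- pv_equiv track=rewrite | github.com/tsaty01/ELC-Sem4-Secure-Network-Config | src/playfair.py | _generate_playfair_grid
-- ===== SOURCE A (Python) =====
-- def _generate_playfair_grid(key: str) -> str:
--     """Helper function to build the 25-character Playfair grid."""
--     # Clean the key: uppercase, keep only letters, treat J as I
--     clean_key = "".join(filter(str.isalpha, key.upper())).replace("J", "I")
--
--     grid = ""
--     # Standard alphabet without J
--     alphabet = "ABCDEFGHIKLMNOPQRSTUVWXYZ"
--
--     # Add unique letters from the key, then fill with remaining alphabet
--     for char in clean_key + alphabet:
--         if len(grid) == 25: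
--             break
--         if char not in grid:
--             grid += char
--
--     return grid
-- ===== SOURCE B (Python) =====
-- def _generate_playfair_grid(key: str) -> str:
--     """Rank-and-sort build: each of the 25 grid letters gets a numeric rank
--     (first-occurrence index in the cleaned key, or key-length + alphabet index
--     if absent from the key); sorting the fixed alphabet by rank yields the grid."""
--     clean_key = "".join(filter(str.isalpha, key.upper())).replace("J", "I")
--     alphabet = "ABCDEFGHIKLMNOPQRSTUVWXYZ"
--     def rank(c):
--         i = clean_key.find(c)
--         return i if i >= 0 else len(clean_key) + alphabet.find(c)
--     return "".join(sorted(alphabet, key=rank))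
-- ===== Notes on version B (the rewrite author's own statement) =====
-- stated objective: alternative
-- what changed: Replaces A's sequential dedupe loop over key+alphabet (membership scan of the growing partial grid with a length-25 break) by a rank-and-sort algorithm: each alphabet letter gets a numeric rank (first-occurrence index in the cleaned key via str.find, or key-length plus alphabet index when absent) and the fixed 25-letter alphabet is sorted by that rank; the per-character Python-level membership scans disappear into 25 C-level str.find calls.
import Mathlib
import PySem

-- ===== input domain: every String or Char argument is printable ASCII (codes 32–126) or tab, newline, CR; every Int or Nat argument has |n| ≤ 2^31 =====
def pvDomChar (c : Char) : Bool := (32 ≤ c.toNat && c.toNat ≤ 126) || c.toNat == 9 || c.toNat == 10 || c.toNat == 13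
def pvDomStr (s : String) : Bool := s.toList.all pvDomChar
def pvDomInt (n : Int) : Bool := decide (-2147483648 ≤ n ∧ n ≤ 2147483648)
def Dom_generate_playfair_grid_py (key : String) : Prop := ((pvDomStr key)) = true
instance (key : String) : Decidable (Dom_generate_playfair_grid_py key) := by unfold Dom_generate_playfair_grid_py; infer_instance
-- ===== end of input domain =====

-- B replaces A's dedupe-with-break loop over key+alphabet by a rank-and-sort algorithm:
-- every alphabet letter gets a numeric rank and the fixed 25-letter alphabet is sorted by it.

-- ===== PORT A =====
-- the loop body; Python's 'break' at len(grid)==25 is modelled by freezing the state,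
-- which is identical since the state never changes once its length is 25
def pvStepA (grid : List Char) (c : Char) : List Char :=
  if grid.length = 25 then grid
  else if grid.contains c then grid
  else grid ++ [c]

def generate_playfair_grid_py (key : String) : String :=
  let clean_key : String :=
    PySem.Str.replace (String.ofList ((PySem.Str.upper key).toList.filter PySem.Chars.isalpha)) "J" "I"
  let alphabet : String := "ABCDEFGHIKLMNOPQRSTUVWXYZ"
  String.ofList ((clean_key.toList ++ alphabet.toList).foldl pvStepA [])

-- ===== PORT B =====
def generate_playfair_grid_py_alt (key : String) : String :=
  let clean_key : String :=
    PySem.Str.replace (String.ofList ((PySem.Str.upper key).toList.filter PySem.Chars.isalpha)) "J" "I"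
  let alphabet : String := "ABCDEFGHIKLMNOPQRSTUVWXYZ"
  let rank : Char → Int := fun c =>
    let i := PySem.Str.find clean_key (String.ofList [c])
    if 0 ≤ i then i else PySem.Str.len clean_key + PySem.Str.find alphabet (String.ofList [c])
  String.ofList (PySem.List.sorted alphabet.toList rank)

-- ===== PRECONDITION & SPEC =====
def Spec_generate_playfair_grid_py (key : String) (out : String) : Prop := out = generate_playfair_grid_py_alt key
instance (key : String) (out : String) : Decidable (Spec_generate_playfair_grid_py key out) := by unfold Spec_generate_playfair_grid_py; infer_instance

-- ===== CLAIM (what is proved, stated in full; the proofs are below) =====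
def Claim_equal_generate_playfair_grid_py : Prop := ∀ (key : String), Dom_generate_playfair_grid_py key → Spec_generate_playfair_grid_py key (generate_playfair_grid_py key)

-- ===== LEMMAS AND PROOFS =====

-- the simple dedupe step A's guarded step reduces to (= PySem.Set.add)
def pvF (g : List Char) (c : Char) : List Char := if g.contains c then g else g ++ [c]

-- J→I on a single char
def pvJ (c : Char) : Char := if c = 'J' then 'I' else c

-- the 25-letter alphabet as a list
def pvA25 : List Char := "ABCDEFGHIKLMNOPQRSTUVWXYZ".toList

lemma pvA25_nodup : pvA25.Nodup := by decide

lemma pvA25_len : pvA25.length = 25 := by decide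

-- replace with single-char pattern is a map
lemma replace_go_single (l : List Char) : ∀ (fuel : Nat) (acc : List Char), l.length ≤ fuel →
    PySem.Chars.replace.go ['J'] ['I'] fuel l acc = acc.reverse ++ l.map pvJ := by
  induction l with
  | nil =>
    intro fuel acc _
    cases fuel <;> simp [PySem.Chars.replace.go]
  | cons c t ih =>
    intro fuel acc hle
    cases fuel with
    | zero => simp at hle
    | succ f =>
      have ht : t.length ≤ f := by simpa using hle
      by_cases hc : c = 'J'
      · subst hc
        rw [PySem.Chars.replace.go]
        simp [List.isPrefixOf, ih f _ ht, pvJ]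
      · rw [PySem.Chars.replace.go]
        have hpre : (['J'].isPrefixOf (c :: t)) = false := by
          simp [List.isPrefixOf]; exact fun h => hc h.symm
        simp [hpre, ih f _ ht, pvJ, hc]

lemma replace_single (l : List Char) :
    PySem.Chars.replace l ['J'] ['I'] = l.map pvJ := by
  rw [PySem.Chars.replace]
  simp [replace_go_single l l.length [] le_rfl]

-- a cleaned char lands in the 25-letter alphabet
lemma pvJ_upper_mem (e : Char) (h : PySem.Chars.isalpha (PySem.Chars.upperChar e) = true) :
    pvJ (PySem.Chars.upperChar e) ∈ pvA25 := by
  by_cases hl : PySem.Chars.islower e = true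
  · have hb : 97 ≤ e.toNat ∧ e.toNat ≤ 122 := by
      simp only [PySem.Chars.islower, Bool.and_eq_true, decide_eq_true_eq] at hl
      obtain ⟨h1, h2⟩ := hl
      rw [Char.le_def] at h1 h2
      exact ⟨UInt32.le_iff_toNat_le.1 h1, UInt32.le_iff_toNat_le.1 h2⟩
    obtain ⟨h1, h2⟩ := hb
    have hu : PySem.Chars.upperChar e = Char.ofNat (e.toNat - 32) := by
      simp [PySem.Chars.upperChar, hl]
    rw [hu]
    have he : Char.ofNat e.toNat = e := Char.ofNat_toNat e
    interval_cases h : e.toNat <;> decide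
  · have hu : PySem.Chars.upperChar e = e := by simp [PySem.Chars.upperChar, hl]
    rw [hu] at h ⊢
    have hup : PySem.Chars.isupper e = true := by
      simp [PySem.Chars.isalpha, hl] at h; exact h
    have hb : 65 ≤ e.toNat ∧ e.toNat ≤ 90 := by
      simp only [PySem.Chars.isupper, Bool.and_eq_true, decide_eq_true_eq] at hup
      obtain ⟨h1, h2⟩ := hup
      rw [Char.le_def] at h1 h2
      exact ⟨UInt32.le_iff_toNat_le.1 h1, UInt32.le_iff_toNat_le.1 h2⟩
    obtain ⟨h1, h2⟩ := hb
    have he : Char.ofNat e.toNat = e := Char.ofNat_toNat e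
    rw [← he]
    interval_cases h : e.toNat <;> decide

-- A's guarded step equals the plain dedupe step under the invariant
lemma foldA_eq_foldF (l : List Char) : ∀ (g : List Char), g.Nodup → (∀ c ∈ g, c ∈ pvA25) →
    (∀ c ∈ l, c ∈ pvA25) → l.foldl pvStepA g = l.foldl pvF g := by
  induction l with
  | nil => intro g _ _ _; rfl
  | cons c t ih =>
    intro g hnd hsub hl
    have hc : c ∈ pvA25 := hl c (List.mem_cons_self ..)
    have hstep : pvStepA g c = pvF g c := by
      by_cases h25 : g.length = 25
      · have hperm : g.Perm pvA25 :=
          (hnd.subperm hsub).perm_of_length_le (by rw [pvA25_len, h25])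
        have hcg : c ∈ g := hperm.mem_iff.2 hc
        simp [pvStepA, pvF, h25, hcg]
      · simp [pvStepA, pvF, h25]
    have hnd' : (pvF g c).Nodup := by
      by_cases hm : c ∈ g
      · simpa [pvF, hm] using hnd
      · simp [pvF, hm, List.nodup_append, hnd]
        exact fun a ha hac => hm (hac ▸ ha)
    have hsub' : ∀ x ∈ pvF g c, x ∈ pvA25 := by
      intro x hx
      by_cases hm : c ∈ g
      · exact hsub x (by simpa [pvF, hm] using hx)
      · rcases by simpa [pvF, hm] using hx with h | h
        · exact hsub x h
        · subst h; exact hc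
    have hl' : ∀ x ∈ t, x ∈ pvA25 := fun x hx => hl x (List.mem_cons_of_mem _ hx)
    simp only [List.foldl_cons, hstep]
    exact ih (pvF g c) hnd' hsub' hl'

-- dedupe-folding a duplicate-free list = append the not-yet-seen elements
lemma foldF_nodup (ys : List Char) : ∀ (acc : List Char), ys.Nodup →
    ys.foldl pvF acc = acc ++ ys.filter (fun c => !acc.contains c) := by
  induction ys with
  | nil => intro acc _; simp
  | cons y t ih =>
    intro acc hnd
    have hy : y ∉ t := (List.nodup_cons.1 hnd).1
    have hnd' : t.Nodup := (List.nodup_cons.1 hnd).2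
    by_cases hm : y ∈ acc
    · have h1 : pvF acc y = acc := by simp [pvF, hm]
      rw [List.foldl_cons, h1, ih acc hnd']
      simp [hm]
    · have h1 : pvF acc y = acc ++ [y] := by simp [pvF, hm]
      rw [List.foldl_cons, h1, ih (acc ++ [y]) hnd']
      have hfe : t.filter (fun c => !(acc ++ [y]).contains c)
          = t.filter (fun c => !acc.contains c) := by
        apply List.filter_congr
        intro x hx
        have hxy : x ≠ y := fun h => hy (h ▸ hx)
        simp [hxy]
      rw [hfe]
      simp [hm]

-- the pvF fold from [] is PySem.Set.ofList
lemma foldF_eq_ofList (l : List Char) : l.foldl pvF [] = PySem.Set.ofList l := rfl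

-- find of a single char = first-occurrence index (or -1)
lemma find_go_single (c : Char) (l : List Char) : ∀ (k : Nat),
    PySem.Chars.find.go [c] l k = if c ∈ l then ((k + l.idxOf c : Nat) : Int) else -1 := by
  induction l with
  | nil => intro k; simp [PySem.Chars.find.go]
  | cons h t ih =>
    intro k
    rw [PySem.Chars.find.go]
    by_cases hc : c = h
    · subst hc
      simp [List.isPrefixOf, List.idxOf_cons_self]
    · have hpre : (([c].isPrefixOf (h :: t))) = false := by
        simpa [List.isPrefixOf] using hc
      have hne : h ≠ c := fun h' => hc h'.symm
      simp only [hpre, Bool.false_eq_true, if_false, ih (k + 1)]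
      by_cases hm : c ∈ t
      · simp [hm, hc, List.idxOf_cons_ne _ hne]
        omega
      · simp [hm, hc]

lemma find_single_mem (l : List Char) (c : Char) (h : c ∈ l) :
    PySem.Chars.find l [c] = (l.idxOf c : Int) := by
  rw [PySem.Chars.find, find_go_single]
  simp [h]

lemma find_single_not_mem (l : List Char) (c : Char) (h : c ∉ l) :
    PySem.Chars.find l [c] = -1 := by
  rw [PySem.Chars.find, find_go_single]
  simp [h]

-- the ordered dedup is strictly increasing in first-occurrence index
lemma ofList_pairwise_idxOf (l : List Char) :
    (PySem.Set.ofList l).Pairwise (fun a b => l.idxOf a < l.idxOf b) := by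
  induction l using List.reverseRecOn with
  | nil => simp [PySem.Set.ofList, PySem.Set.empty]
  | append_singleton l c ih =>
    have hof : PySem.Set.ofList (l ++ [c]) = PySem.Set.add (PySem.Set.ofList l) c := by
      simp [PySem.Set.ofList, List.foldl_append]
    rw [hof]
    have hP : (PySem.Set.ofList l).Pairwise (fun a b => (l ++ [c]).idxOf a < (l ++ [c]).idxOf b) := by
      refine ih.imp_of_mem ?_
      intro a b ha hb hab
      have ha' : a ∈ l := (PySem.Set.mem_ofList l a).1 ha
      have hb' : b ∈ l := (PySem.Set.mem_ofList l b).1 hb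
      rwa [List.idxOf_append, List.idxOf_append, if_pos ha', if_pos hb']
    by_cases hm : c ∈ l
    · have : PySem.Set.add (PySem.Set.ofList l) c = PySem.Set.ofList l := by
        simp [PySem.Set.add, (PySem.Set.mem_ofList l c).2 hm]
      rw [this]; exact hP
    · have hcl : c ∉ l := hm
      have : PySem.Set.add (PySem.Set.ofList l) c = PySem.Set.ofList l ++ [c] := by
        simp [PySem.Set.add, hcl]
      rw [this, List.pairwise_append]
      refine ⟨hP, List.pairwise_singleton _ _, ?_⟩
      intro a ha b hb
      have ha' : a ∈ l := (PySem.Set.mem_ofList l a).1 ha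
      rcases List.mem_singleton.1 hb with rfl
      rw [List.idxOf_append, if_pos ha', List.idxOf_append, if_neg hcl]
      have h1 : l.idxOf a < l.length := List.idxOf_lt_length_of_mem ha'
      have h2 : ([b].idxOf b) = 0 := by simp
      omega

-- a nodup list is strictly increasing in its own idxOf
lemma nodup_pairwise_idxOf (l : List Char) (h : l.Nodup) :
    l.Pairwise (fun a b => l.idxOf a < l.idxOf b) := by
  rw [List.pairwise_iff_getElem]
  intro i j hi hj hij
  rw [h.idxOf_getElem i hi, h.idxOf_getElem j hj]
  exact hij

-- ===== VERDICT (by name: the statement is the Claim_ definition above) =====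
theorem generate_playfair_grid_py_spec : Claim_equal_generate_playfair_grid_py := by
  intro key _
  unfold Spec_generate_playfair_grid_py generate_playfair_grid_py generate_playfair_grid_py_alt
  simp only [PySem.Str.toList_replace, String.toList_ofList, PySem.Str.find_eq, PySem.Str.len_eq]
  rw [show ("J" : String).toList = ['J'] from rfl, show ("I" : String).toList = ['I'] from rfl,
    replace_single]
  rw [show ("ABCDEFGHIKLMNOPQRSTUVWXYZ" : String).toList = pvA25 from rfl]
  set up := (PySem.Str.upper key).toList with hup
  set clean : List Char := (up.filter PySem.Chars.isalpha).map pvJ with hclean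
  have hcleanmem : ∀ c ∈ clean, c ∈ pvA25 := by
    intro c hc
    rw [hclean] at hc
    simp only [List.mem_map, List.mem_filter] at hc
    obtain ⟨d, ⟨hd, hda⟩, hdc⟩ := hc
    rw [hup] at hd
    simp only [PySem.Str.upper, String.toList_ofList, PySem.Chars.upper, List.mem_map] at hd
    obtain ⟨e, _, he⟩ := hd
    subst hdc
    rw [← he]
    exact pvJ_upper_mem e (he ▸ hda)
  set K : List Char := PySem.Set.ofList clean with hK
  set rank : Char → Int := fun c =>
    if 0 ≤ PySem.Chars.find clean [c] then PySem.Chars.find clean [c]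
    else (clean.length : Int) + PySem.Chars.find pvA25 [c] with hrank
  set target : List Char := K ++ pvA25.filter (fun c => !K.contains c) with htarget
  -- A side: remove the break guard, split the fold, close the dedupe fold
  have hA : (clean ++ pvA25).foldl pvStepA [] = target := by
    have h1 : (clean ++ pvA25).foldl pvStepA [] = (clean ++ pvA25).foldl pvF [] := by
      apply foldA_eq_foldF
      · exact List.nodup_nil
      · intro c hc; simp at hc
      · intro c hc
        rcases List.mem_append.1 hc with h | h
        · exact hcleanmem c h
        · exact h
    rw [h1, List.foldl_append, foldF_eq_ofList, foldF_nodup pvA25 _ pvA25_nodup, htarget, hK]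
  rw [hA]
  -- B side: the sort of pvA25 by rank is exactly target
  have hKmem : ∀ c, c ∈ K ↔ c ∈ clean := fun c => by rw [hK]; exact PySem.Set.mem_ofList clean c
  have hKnd : K.Nodup := hK ▸ PySem.Set.nodup_ofList clean
  have hB : PySem.List.sorted pvA25 rank = target := by
    apply PySem.List.sorted_eq_of_perm_of_pairwise_lt
    · -- target is a permutation of pvA25
      have hKperm : K.Perm (pvA25.filter (fun c => K.contains c)) := by
        apply (List.perm_ext_iff_of_nodup hKnd (pvA25_nodup.filter _)).2
        intro c
        simp only [List.mem_filter]
        constructor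
        · intro hc
          exact ⟨hcleanmem c ((hKmem c).1 hc), by simpa using hc⟩
        · intro ⟨_, hc⟩
          simpa using hc
      rw [htarget]
      exact (hKperm.append_right _).trans (List.filter_append_perm _ _)
    · -- rank is strictly increasing along target
      rw [htarget, List.pairwise_append]
      refine ⟨?_, ?_, ?_⟩
      · refine (ofList_pairwise_idxOf clean).imp_of_mem ?_
        intro a b ha hb hab
        have ha' : a ∈ clean := (PySem.Set.mem_ofList clean a).1 ha
        have hb' : b ∈ clean := (PySem.Set.mem_ofList clean b).1 hb
        simp only [hrank]
        simp only [find_single_mem clean a ha', find_single_mem clean b hb']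
        rw [if_pos (by positivity), if_pos (by positivity)]
        exact_mod_cast hab
      · refine ((nodup_pairwise_idxOf pvA25 pvA25_nodup).filter _).imp_of_mem ?_
        intro a b ha hb hab
        have ha2 := List.mem_filter.1 ha
        have hb2 := List.mem_filter.1 hb
        have ha' : a ∉ clean := fun h => by simp [(hKmem a).2 h] at ha2
        have hb' : b ∉ clean := fun h => by simp [(hKmem b).2 h] at hb2
        simp only [hrank]
        simp only [find_single_not_mem clean a ha', find_single_not_mem clean b hb']
        norm_num
        rw [find_single_mem pvA25 a ha2.1, find_single_mem pvA25 b hb2.1]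
        omega
      · intro a ha b hb
        have ha' : a ∈ clean := (hKmem a).1 ha
        have hb2 := List.mem_filter.1 hb
        have hb' : b ∉ clean := fun h => by simp [(hKmem b).2 h] at hb2
        simp only [hrank]
        simp only [find_single_mem clean a ha', find_single_not_mem clean b hb']
        rw [if_pos (by positivity), if_neg (by norm_num)]
        rw [find_single_mem pvA25 b hb2.1]
        have h1 : clean.idxOf a < clean.length := List.idxOf_lt_length_of_mem ha'
        omega
  rw [hB]
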